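-- pv_equiv track=rewrite | github.com/jokfun/algogentp | courbe.py | plusproche
-- ===== SOURCE A (Python) =====
-- def plusproche(mdp,alphabet):
--     """
--         Fonction du plus proche caractère, suivant l'aphabet utilisé
--         ex : A et C sont plus proches que A et D
--     """
--     result = [mdp]
--     for i in range(len(mdp)):
--         pos = alphabet.index(mdp[i])
--         if pos == len(alphabet)-1:
--             pos=0
--         else:
--             pos+=1
--         mdp = list(mdp)
--         mdp[i] = alphabet[pos]
--         mdp = ''.join(mdp)
--         result.insert(0,mdp)
--     return result
-- ===== SOURCE B (Python) =====
-- def plusproche(mdp, alphabet):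
--     def succ(c):
--         return alphabet[(alphabet.index(c) + 1) % len(alphabet)]
--     s = ''.join(succ(c) for c in mdp)
--     return [s[:k] + mdp[k:] for k in range(len(mdp), -1, -1)]
-- ===== Notes on version B (the rewrite author's own statement) =====
-- stated objective: simpler
-- what changed: B replaces A's cumulative in-place mutation with insert(0,...) by one pass computing the fully-advanced string S and then building the result directly as prefix-of-S + suffix-of-mdp slices for k = len(mdp) down to 0.
import Mathlib
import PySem

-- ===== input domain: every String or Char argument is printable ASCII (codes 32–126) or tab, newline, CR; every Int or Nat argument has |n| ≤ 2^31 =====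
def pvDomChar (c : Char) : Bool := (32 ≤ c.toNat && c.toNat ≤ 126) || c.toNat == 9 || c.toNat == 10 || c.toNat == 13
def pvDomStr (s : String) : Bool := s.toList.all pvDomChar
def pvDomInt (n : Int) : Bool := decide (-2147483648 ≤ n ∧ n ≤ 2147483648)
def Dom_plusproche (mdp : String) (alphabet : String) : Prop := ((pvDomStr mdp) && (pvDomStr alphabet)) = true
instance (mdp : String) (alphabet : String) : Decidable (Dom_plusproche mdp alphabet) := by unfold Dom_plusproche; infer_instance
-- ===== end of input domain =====

-- B builds the result by slicing one fully-advanced string instead of A's cumulative mutation; objective: simpler.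

-- ===== PORT A =====
def plusprocheStep (a : List Char) (st : List Char × List String) (i : Int) : List Char × List String :=
  match PySem.List.index? a (PySem.List.pyGetD st.1 i ' ') with
  | none => st   -- alphabet.index raises ValueError here (excluded by Pre_)
  | some p =>
    let pos : Nat := if p = a.length - 1 then 0 else p + 1
    let m := PySem.List.pySetD st.1 i (a.getD pos ' ')
    (m, String.ofList m :: st.2)

def plusproche (mdp : String) (alphabet : String) : List String :=
  ((PySem.List.pyRange 0 (PySem.Str.len mdp) 1).foldl
      (plusprocheStep alphabet.toList) (mdp.toList, [mdp])).2

-- ===== PORT B =====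
-- Source B's helper succ: the cyclic successor of c in alphabet (first occurrence).
def pvSucc (a : List Char) (c : Char) : Char :=
  match PySem.List.index? a c with
  | none => c   -- alphabet.index raises ValueError here (excluded by Pre_)
  | some p => a.getD ((p + 1) % a.length) ' '

def plusproche_alt (mdp : String) (alphabet : String) : List String :=
  let s := mdp.toList.map (pvSucc alphabet.toList)
  (PySem.List.pyRange (PySem.Str.len mdp) (-1) (-1)).map fun k =>
    String.ofList (PySem.List.slice s none (some k) ++ PySem.List.slice mdp.toList (some k) none)

-- ===== PRECONDITION & SPEC =====
-- Pre_ excludes exactly the inputs where some character of mdp is missing from alphabet: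
-- there A (and B) raise ValueError from alphabet.index.
def Pre_plusproche (mdp : String) (alphabet : String) : Prop :=
  mdp.toList.all (fun c => alphabet.toList.contains c) = true
instance (mdp : String) (alphabet : String) : Decidable (Pre_plusproche mdp alphabet) := by
  unfold Pre_plusproche; infer_instance
def pvWitness_plusproche : String × String := ("ab", "abc")

def Spec_plusproche (mdp : String) (alphabet : String) (out : List String) : Prop :=
  out = plusproche_alt mdp alphabet
instance (mdp : String) (alphabet : String) (out : List String) : Decidable (Spec_plusproche mdp alphabet out) := by
  unfold Spec_plusproche; infer_instance

-- ===== CLAIM (what is proved, stated in full; the proofs are below) =====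
def Claim_equal_plusproche : Prop := ∀ (mdp : String) (alphabet : String), Dom_plusproche mdp alphabet → Pre_plusproche mdp alphabet → Spec_plusproche mdp alphabet (plusproche mdp alphabet)

-- ===== LEMMAS AND PROOFS =====

-- A's wrap-around branch computes (p+1) % len when p is a valid index.
theorem pos_eq_mod (len p : Nat) (hp : p < len) :
    (if p = len - 1 then 0 else p + 1) = (p + 1) % len := by
  split_ifs with h
  · subst h; have hlen : len - 1 + 1 = len := by omega
    rw [hlen, Nat.mod_self]
  · rw [Nat.mod_eq_of_lt (by omega)]

theorem foldA (a w : List Char) (h : ∀ c ∈ w, c ∈ a) (k : Nat) (hk : k ≤ w.length) :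
    (PySem.List.pyRange 0 (k : Int) 1).foldl (plusprocheStep a) (w, [String.ofList w]) =
      ((w.map (pvSucc a)).take k ++ w.drop k,
       (List.range (k + 1)).map
         (fun j => String.ofList ((w.map (pvSucc a)).take (k - j) ++ w.drop (k - j)))) := by
  induction k with
  | zero => simp [PySem.List.pyRange_one_eq_nil]
  | succ k ih =>
    have hk' : k ≤ w.length := by omega
    have hkl : k < w.length := by omega
    have hsplit : PySem.List.pyRange 0 ((k:Int)+1) 1 = PySem.List.pyRange 0 (k:Int) 1 ++ [(k:Int)] := by
      simpa using PySem.List.pyRange_one_succ_right (show (0:Int) ≤ (k:Int) from Int.natCast_nonneg k)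
    have hcast : ((k+1 : Nat) : Int) = (k:Int) + 1 := by push_cast; ring
    rw [hcast, hsplit, List.foldl_append, ih hk']
    -- now one step at index k
    set s := w.map (pvSucc a) with hs
    have hslen : s.length = w.length := by simp [hs]
    have hltk : (List.take k s).length = k := by simp [hslen]; omega
    have hm : (s.take k ++ w.drop k).getD k ' ' = w[k] := by
      simp [List.getD_eq_getElem?_getD, List.getElem?_append_right, hltk, List.getElem?_drop, hkl]
    have hmem : w[k] ∈ a := h _ (List.getElem_mem hkl)
    cases hp : PySem.List.index? a w[k] with
    | none =>
      rw [PySem.List.index?_eq_idxOf?, List.idxOf?_eq_none_iff] at hp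
      exact absurd hmem hp
    | some p =>
    obtain ⟨hpl, hap, -⟩ := PySem.List.getElem_of_index?_eq_some hp
    have hp' : List.idxOf? w[k] a = some p := by
      rw [← PySem.List.index?_eq_idxOf?]; exact hp
    have hc : a.getD ((p + 1) % a.length) ' ' = s[k]'(by omega) := by
      simp [hs, pvSucc, hp']
    have htake : s.take (k+1) = s.take k ++ [s[k]'(by omega)] := by
      rw [List.take_succ]
      simp [List.getElem?_eq_getElem (show k < s.length by omega)]
    have hset : (s.take k ++ w.drop k).set k (a.getD ((p + 1) % a.length) ' ')
        = s.take (k+1) ++ w.drop (k+1) := by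
      rw [List.drop_eq_getElem_cons hkl, List.set_append_right _ _ (by omega),
          hltk, Nat.sub_self, List.set_cons_zero, hc, htake,
          List.append_assoc, List.singleton_append]
    rw [List.foldl_cons, List.foldl_nil]
    simp only [plusprocheStep, PySem.List.pyGetD_natCast, hm,
      PySem.List.index?_eq_idxOf?, hp', PySem.List.pySetD_natCast,
      pos_eq_mod a.length p hpl, hset]
    refine Prod.ext rfl ?_
    conv_rhs => rw [List.range_succ_eq_map]
    simp only [List.map_cons, List.map_map]
    refine congrArg₂ _ (by simp) ?_
    refine List.map_congr_left (fun j hj => ?_)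
    simp [Nat.succ_sub_succ]

-- ===== VERDICT (by name: the statement is the Claim_ definition above) =====
theorem plusproche_spec : Claim_equal_plusproche := by
  intro mdp alphabet _ hpre
  have hpre' : ∀ c ∈ mdp.toList, c ∈ alphabet.toList := fun c hc => by
    simpa using List.all_eq_true.mp hpre c hc
  unfold Spec_plusproche plusproche plusproche_alt
  have hw : (mdp : String) = String.ofList mdp.toList := by simp
  have hlen : PySem.Str.len mdp = (mdp.toList.length : Int) := by simp
  conv_lhs => rw [hlen, hw]
  simp only [String.toList_ofList]
  rw [foldA alphabet.toList mdp.toList hpre' mdp.toList.length le_rfl]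
  rw [hlen, PySem.List.pyRange_neg_one, List.map_map]
  have hnn : ((mdp.toList.length : Int) - (-1)).toNat = mdp.toList.length + 1 := by omega
  rw [hnn]
  refine List.map_congr_left (fun j hj => ?_)
  have hjn : j ≤ mdp.toList.length := by
    simpa using Nat.lt_succ_iff.mp (List.mem_range.mp hj)
  have hcast : ((mdp.toList.length : Int) - (j : Int)) = ((mdp.toList.length - j : Nat) : Int) := by
    omega
  simp only [Function.comp_apply, hcast, PySem.List.slice_to_natCast,
    PySem.List.slice_from_natCast]
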